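-- pv_equiv track=rewrite | github.com/paicmr2026/CMR-editable-now- | experiments/mnist_original/mnist_dataset.py | create_single_digit_addition
-- ===== SOURCE A (Python) =====
-- from itertools import product
-- from collections import defaultdict
--
-- def create_single_digit_addition(num_digits, digit_limit=10):
--     concept_names = ["x%d%d" % (i, j) for i, j in product(range(num_digits), range(digit_limit))]
--
--
--     sums = defaultdict(list)
--     for d in product(*[range(digit_limit) for _ in range(num_digits)]):
--         conj = []
--         z = 0
--         for i, n in enumerate(d):
--             conj.append("x%d%d" % (i,n))
--             z += n
--         sums[z].append("(" + " & ".join(conj) + ")")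
--
--
--     explanations = {}
--     class_names = ["z%d" % z for z in range(digit_limit*num_digits - num_digits + 1)]
--     for z in range(digit_limit*num_digits - num_digits + 1):
--
--         explanations["z%d" % z] = {"name": "%d" % z,
--                                    "explanation": "(" + " | ".join(sums[z]) + ")"}
--
--     return concept_names, class_names, explanations
-- ===== SOURCE B (Python) =====
-- def create_single_digit_addition(num_digits, digit_limit=10):
--     concept_names = ["x%d%d" % (i, j) for i in range(num_digits) for j in range(digit_limit)]
--
--     def comps(k, z):
--         # digit tuples of length k, entries in range(digit_limit), summing to z, lexicographic.
--         # The first digit n must leave a reachable remainder: 0 <= z-n <= (k-1)*(digit_limit-1).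
--         if k <= 0:
--             return [[]] if z == 0 else []
--         lo = max(0, z - (k - 1) * (digit_limit - 1))
--         hi = min(digit_limit - 1, z)
--         return [[n] + rest for n in range(lo, hi + 1) for rest in comps(k - 1, z - n)]
--
--     num_classes = digit_limit * num_digits - num_digits + 1
--     class_names = ["z%d" % z for z in range(num_classes)]
--     explanations = {}
--     for z in range(num_classes):
--         disj = " | ".join(
--             "(" + " & ".join("x%d%d" % (i, n) for i, n in enumerate(c)) + ")"
--             for c in comps(num_digits, z)
--         )
--         explanations["z%d" % z] = {"name": "%d" % z, "explanation": "(" + disj + ")"}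
--     return concept_names, class_names, explanations
-- ===== Notes on version B (the rewrite author's own statement) =====
-- stated objective: alternative
-- what changed: B drops the full Cartesian-product sweep and the group-by-sum defaultdict: it enumerates, for each class sum z directly, the digit tuples of that sum by a recursive composition enumeration (lexicographic, so the joined DNF strings are byte-identical), building each explanation independently.
import Mathlib
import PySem

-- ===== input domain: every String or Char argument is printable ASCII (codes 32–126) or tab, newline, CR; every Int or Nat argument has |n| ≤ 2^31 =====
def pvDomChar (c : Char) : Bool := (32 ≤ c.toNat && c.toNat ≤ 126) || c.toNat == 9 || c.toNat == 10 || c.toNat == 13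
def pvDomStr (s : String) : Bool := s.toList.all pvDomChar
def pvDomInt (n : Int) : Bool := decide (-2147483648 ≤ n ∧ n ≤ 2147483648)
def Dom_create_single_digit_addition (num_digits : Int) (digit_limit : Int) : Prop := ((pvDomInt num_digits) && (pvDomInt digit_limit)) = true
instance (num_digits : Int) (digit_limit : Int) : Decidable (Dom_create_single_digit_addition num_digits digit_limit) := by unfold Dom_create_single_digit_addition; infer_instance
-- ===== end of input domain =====

-- B replaces the full Cartesian-product sweep + group-by-sum dict with a direct recursive
-- enumeration of the digit tuples of each target sum (objective: alternative decomposition).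

-- ===== PORT A =====
-- itertools.product(*[range(digit_limit) for _ in range(num_digits)]) (rightmost varies fastest)
def pvProd : Nat → List Int → List (List Int)
  | 0, _ => [[]]
  | k + 1, base => base.flatMap (fun a => (pvProd k base).map (a :: ·))

def create_single_digit_addition (num_digits : Int) (digit_limit : Int) : List String × List String × (List (String × List (String × String))) :=
  let concept_names := (PySem.List.pyRange 0 num_digits 1).flatMap (fun i =>
    (PySem.List.pyRange 0 digit_limit 1).map (fun j => "x" ++ PySem.Int.toStr i ++ PySem.Int.toStr j))
  let sums := (pvProd num_digits.toNat (PySem.List.pyRange 0 digit_limit 1)).foldl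
    (fun (s : PySem.Dict Int (List String)) d =>
      let cz := (PySem.List.enumerate d 0).foldl
        (fun (acc : List String × Int) p =>
          (acc.1 ++ ["x" ++ PySem.Int.toStr p.1 ++ PySem.Int.toStr p.2], acc.2 + p.2)) ([], 0)
      s.modify cz.2 [] (· ++ ["(" ++ PySem.Str.join " & " cz.1 ++ ")"]))
    PySem.Dict.empty
  let nclasses := digit_limit * num_digits - num_digits + 1
  let class_names := (PySem.List.pyRange 0 nclasses 1).map (fun z => "z" ++ PySem.Int.toStr z)
  let explanations := (PySem.List.pyRange 0 nclasses 1).foldl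
    (fun (e : PySem.Dict String (List (String × String))) z =>
      e.insert ("z" ++ PySem.Int.toStr z)
        [("name", PySem.Int.toStr z),
         ("explanation", "(" ++ PySem.Str.join " | " (sums.getD z []) ++ ")")])
    PySem.Dict.empty
  (concept_names, class_names, explanations.items)

-- ===== PORT B =====
-- comps(k, z): digit tuples of length k, entries in range(digit_limit), summing to z,
-- lexicographic; the first digit is bounded so the remainder stays reachable
def pvComps (digit_limit : Int) : Nat → Int → List (List Int)
  | 0, z => if z = 0 then [[]] else []
  | k + 1, z => (PySem.List.pyRange (max 0 (z - (k : Int) * (digit_limit - 1))) (min (digit_limit - 1) z + 1) 1).flatMap (fun n =>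
      (pvComps digit_limit k (z - n)).map (n :: ·))

def create_single_digit_addition_alt (num_digits : Int) (digit_limit : Int) : List String × List String × (List (String × List (String × String))) :=
  let concept_names := (PySem.List.pyRange 0 num_digits 1).flatMap (fun i =>
    (PySem.List.pyRange 0 digit_limit 1).map (fun j => "x" ++ PySem.Int.toStr i ++ PySem.Int.toStr j))
  let nclasses := digit_limit * num_digits - num_digits + 1
  let class_names := (PySem.List.pyRange 0 nclasses 1).map (fun z => "z" ++ PySem.Int.toStr z)
  let explanations := (PySem.List.pyRange 0 nclasses 1).foldl
    (fun (e : PySem.Dict String (List (String × String))) z =>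
      e.insert ("z" ++ PySem.Int.toStr z)
        [("name", PySem.Int.toStr z),
         ("explanation", "(" ++ PySem.Str.join " | "
            ((pvComps digit_limit num_digits.toNat z).map (fun c =>
              "(" ++ PySem.Str.join " & " ((PySem.List.enumerate c 0).map
                (fun p => "x" ++ PySem.Int.toStr p.1 ++ PySem.Int.toStr p.2)) ++ ")")) ++ ")")])
    PySem.Dict.empty
  (concept_names, class_names, explanations.items)

-- ===== PRECONDITION & SPEC =====
def Spec_create_single_digit_addition (num_digits : Int) (digit_limit : Int) (out : List String × List String × (List (String × List (String × String)))) : Prop := out = create_single_digit_addition_alt num_digits digit_limit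
instance (num_digits : Int) (digit_limit : Int) (out : List String × List String × (List (String × List (String × String)))) : Decidable (Spec_create_single_digit_addition num_digits digit_limit out) := by unfold Spec_create_single_digit_addition; infer_instance

-- ===== CLAIM (what is proved, stated in full; the proofs are below) =====
def Claim_equal_create_single_digit_addition : Prop := ∀ (num_digits : Int) (digit_limit : Int), Dom_create_single_digit_addition num_digits digit_limit → Spec_create_single_digit_addition num_digits digit_limit (create_single_digit_addition num_digits digit_limit)

-- ===== LEMMAS AND PROOFS =====

-- proof-only: the unpruned enumeration (full first-digit range), intermediate between A and B
def pvCompsFull (digit_limit : Int) : Nat → Int → List (List Int)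
  | 0, z => if z = 0 then [[]] else []
  | k + 1, z => (PySem.List.pyRange 0 digit_limit 1).flatMap (fun n =>
      (pvCompsFull digit_limit k (z - n)).map (n :: ·))

-- the enumeration is empty when the target sum is unreachable
theorem pvCompsFull_eq_nil (L : Int) (k : Nat) (z : Int)
    (h : z < 0 ∨ (k : Int) * (L - 1) < z) : pvCompsFull L k z = [] := by
  induction k generalizing z with
  | zero =>
      have hz : z ≠ 0 := by rcases h with h | h <;> [omega; (simp at h; omega)]
      simp [pvCompsFull, hz]
  | succ k ih =>
      simp only [pvCompsFull, List.flatMap_eq_nil_iff]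
      intro n hn
      rw [PySem.List.mem_pyRange_one] at hn
      rw [ih (z - n) ?_, List.map_nil]
      have hexp : ((k : Int) + 1) * (L - 1) = (k : Int) * (L - 1) + (L - 1) := by ring
      push_cast at h
      rw [hexp] at h
      generalize (k : Int) * (L - 1) = K at h ⊢
      omega

-- pruning the first-digit range drops only empty contributions
theorem pvComps_eq_full (L : Int) (k : Nat) (z : Int) :
    pvComps L k z = pvCompsFull L k z := by
  induction k generalizing z with
  | zero => rfl
  | succ k ih =>
      simp only [pvComps, pvCompsFull]
      have hg : ∀ n : Int, (pvComps L k (z - n)).map (n :: ·)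
          = (pvCompsFull L k (z - n)).map (n :: ·) := fun n => by rw [ih]
      simp only [hg]
      have hnil : ∀ n : Int, 0 ≤ n → n < L →
          (n < max 0 (z - (k : Int) * (L - 1)) ∨ min (L - 1) z + 1 ≤ n) →
          (pvCompsFull L k (z - n)).map (n :: ·) = ([] : List (List Int)) := by
        intro n hn0 hnL hout
        rw [pvCompsFull_eq_nil L k (z - n) ?_, List.map_nil]
        generalize hK : (k : Int) * (L - 1) = K at hout ⊢
        omega
      by_cases hord : min (L - 1) z + 1 ≤ max 0 (z - (k : Int) * (L - 1))
      · rw [PySem.List.pyRange_one_eq_nil hord]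
        rw [List.flatMap_nil, Eq.comm, List.flatMap_eq_nil_iff]
        intro n hn
        rw [PySem.List.mem_pyRange_one] at hn
        exact hnil n hn.1 hn.2 (by generalize (k : Int) * (L - 1) = K at hord ⊢; omega)
      · have h1 : (0 : Int) ≤ max 0 (z - (k : Int) * (L - 1)) := le_max_left 0 _
        have h2 : max 0 (z - (k : Int) * (L - 1)) ≤ min (L - 1) z + 1 := by
          generalize (k : Int) * (L - 1) = K at hord ⊢; omega
        have h3 : min (L - 1) z + 1 ≤ L := by
          generalize (k : Int) * (L - 1) = K at hord ⊢; omega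
        rw [PySem.List.pyRange_one_append 0 (max 0 (z - (k : Int) * (L - 1))) L h1 (by omega),
            PySem.List.pyRange_one_append (max 0 (z - (k : Int) * (L - 1))) (min (L - 1) z + 1) L h2 h3,
            List.flatMap_append, List.flatMap_append]
        have hpre : (PySem.List.pyRange 0 (max 0 (z - (k : Int) * (L - 1))) 1).flatMap
            (fun n => (pvCompsFull L k (z - n)).map (n :: ·)) = [] := by
          rw [List.flatMap_eq_nil_iff]
          intro n hn
          rw [PySem.List.mem_pyRange_one] at hn
          exact hnil n hn.1 (by omega) (Or.inl hn.2)
        have hpost : (PySem.List.pyRange (min (L - 1) z + 1) L 1).flatMap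
            (fun n => (pvCompsFull L k (z - n)).map (n :: ·)) = [] := by
          rw [List.flatMap_eq_nil_iff]
          intro n hn
          rw [PySem.List.mem_pyRange_one] at hn
          exact hnil n (by omega) hn.2 (Or.inr hn.1)
        rw [hpre, hpost, List.nil_append, List.append_nil]

def pvF (p : Int × Int) : String := "x" ++ PySem.Int.toStr p.1 ++ PySem.Int.toStr p.2

def pvConjStr (c : List Int) : String :=
  "(" ++ PySem.Str.join " & " ((PySem.List.enumerate c 0).map pvF) ++ ")"

-- the conj/z accumulating loop of A, characterised
theorem pv_pairfold (l : List (Int × Int)) (acc : List String × Int) :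
    l.foldl (fun (acc : List String × Int) p => (acc.1 ++ [pvF p], acc.2 + p.2)) acc
      = (acc.1 ++ l.map pvF, acc.2 + (l.map (·.2)).sum) := by
  induction l generalizing acc with
  | nil => simp
  | cons x xs ih => simp [ih]; omega

-- filtering the full product by sum gives exactly the direct enumeration
theorem pv_filter_prod (L : Int) (k : Nat) (z : Int) :
    (pvProd k (PySem.List.pyRange 0 L 1)).filter (fun d => d.sum == z) = pvCompsFull L k z := by
  induction k generalizing z with
  | zero =>
      simp only [pvProd, pvCompsFull, List.filter_cons, List.filter_nil]
      by_cases h : z = 0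
      · simp [h]
      · simp [h, Ne.symm h]
  | succ k ih =>
      simp only [pvProd, pvCompsFull, List.filter_flatMap]
      refine List.flatMap_congr (fun a _ => ?_)
      rw [List.filter_map]
      have : ((pvProd k (PySem.List.pyRange 0 L 1)).filter
          (fun d => (List.sum (a :: d) == z))) =
          (pvProd k (PySem.List.pyRange 0 L 1)).filter (fun d => d.sum == z - a) := by
        refine List.filter_congr (fun d _ => ?_)
        simp only [List.sum_cons]
        rw [Bool.eq_iff_iff]
        simp only [beq_iff_eq]
        omega
      simp only [Function.comp_def] at *
      rw [this, ih]

theorem pv_sums_getD (L : Int) (k : Nat) (z : Int) :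
    ((pvProd k (PySem.List.pyRange 0 L 1)).foldl
      (fun (s : PySem.Dict Int (List String)) d =>
        let cz := (PySem.List.enumerate d 0).foldl
          (fun (acc : List String × Int) p =>
            (acc.1 ++ ["x" ++ PySem.Int.toStr p.1 ++ PySem.Int.toStr p.2], acc.2 + p.2)) ([], 0)
        s.modify cz.2 [] (· ++ ["(" ++ PySem.Str.join " & " cz.1 ++ ")"]))
      PySem.Dict.empty).getD z []
    = (pvCompsFull L k z).map pvConjStr := by
  have hstep : (fun (s : PySem.Dict Int (List String)) (d : List Int) =>
      let cz := (PySem.List.enumerate d 0).foldl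
        (fun (acc : List String × Int) p =>
          (acc.1 ++ ["x" ++ PySem.Int.toStr p.1 ++ PySem.Int.toStr p.2], acc.2 + p.2)) ([], 0)
      s.modify cz.2 [] (· ++ ["(" ++ PySem.Str.join " & " cz.1 ++ ")"]))
      = fun (s : PySem.Dict Int (List String)) (d : List Int) =>
        s.modify d.sum [] (· ++ [pvConjStr d]) := by
    funext s d
    have := pv_pairfold (PySem.List.enumerate d 0) ([], 0)
    simp only [pvF] at this
    simp only [this, PySem.List.map_snd_enumerate, List.nil_append, Int.zero_add,
      pvConjStr]
  rw [hstep]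
  have hmap : (pvProd k (PySem.List.pyRange 0 L 1)).foldl
      (fun (s : PySem.Dict Int (List String)) d => s.modify d.sum [] (· ++ [pvConjStr d]))
      PySem.Dict.empty
      = ((pvProd k (PySem.List.pyRange 0 L 1)).map (fun d => (d.sum, pvConjStr d))).foldl
        (fun (s : PySem.Dict Int (List String)) p => s.modify p.1 [] (· ++ [p.2]))
        PySem.Dict.empty := by
    rw [List.foldl_map]
  rw [hmap, PySem.Dict.getD_foldl_modify_append]
  simp [List.filter_map, Function.comp_def, List.map_map, pv_filter_prod L k z]

theorem pvConjStr_map_eq (l : List (List Int)) :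
    l.map pvConjStr = l.map (fun c =>
      "(" ++ PySem.Str.join " & " ((PySem.List.enumerate c 0).map
        (fun p => "x" ++ PySem.Int.toStr p.1 ++ PySem.Int.toStr p.2)) ++ ")") := rfl

-- ===== VERDICT (by name: the statement is the Claim_ definition above) =====
theorem create_single_digit_addition_spec : Claim_equal_create_single_digit_addition := by
  intro nd dl _
  show create_single_digit_addition nd dl = create_single_digit_addition_alt nd dl
  simp only [create_single_digit_addition, create_single_digit_addition_alt, Prod.mk.injEq]
  refine ⟨trivial, trivial, ?_⟩
  congr 1
  refine List.foldl_ext _ _ _ (fun e z _ => ?_)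
  rw [pv_sums_getD dl nd.toNat z, ← pvComps_eq_full, pvConjStr_map_eq]
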